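-- pv_equiv track=rewrite | github.com/gjwlsdnd224/projects | jher_238_pa3.py | more_mults
-- ===== SOURCE A (Python) =====
-- def more_mults(lst1_bottom, lst1_top, lst2_bottom, lst2_top, factor):
-- 	c1 = 0
-- 	c2 = 0
-- 	lst1 = []
-- 	lst2 = []
-- 	#creates two lists using range and appens to their respectful list
-- 	for i in range(lst1_bottom,lst1_top+1):
-- 		lst1.append(i)
-- 	for i in range(lst2_bottom,lst2_top+1):
-- 		lst2.append(i)
--
-- 	#counts number of multiples
-- 	for val in lst1:
-- 		if val % factor == 0:
-- 			c1 += 1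
-- 	for val in lst2:
-- 		if val % factor == 0:
-- 			c2 += 1
--
-- 	#determines the winner based on who has more multiples if same shorter list wins
-- 	if c1 > c2:
-- 		winner = "List 1"
-- 	elif c1 < c2:
-- 		winner = "List 2"
-- 	elif c1 == c2 and len(lst1) < len(lst2):
-- 		winner = "List 1"
-- 	elif c1 == c2 and len(lst1) > len(lst2):
-- 		winner = "List 2"
-- 	else:
-- 		winner = "Tie"
-- 	return winner
-- ===== SOURCE B (Python) =====
-- def more_mults(lst1_bottom, lst1_top, lst2_bottom, lst2_top, factor):
--     def count(bottom, top):
--         # number of multiples of factor in [bottom, top], closed form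
--         if top < bottom:
--             return 0
--         af = abs(factor)
--         return top // af - (bottom - 1) // af
--     c1 = count(lst1_bottom, lst1_top)
--     c2 = count(lst2_bottom, lst2_top)
--     if c1 != c2:
--         return "List 1" if c1 > c2 else "List 2"
--     len1 = max(lst1_top - lst1_bottom + 1, 0)
--     len2 = max(lst2_top - lst2_bottom + 1, 0)
--     if len1 != len2:
--         return "List 1" if len1 < len2 else "List 2"
--     return "Tie"
-- ===== Notes on version B (the rewrite author's own statement) =====
-- stated objective: faster
-- what changed: Replaces building both ranges as lists and scanning them with a closed-form divisor count top//|f| - (bottom-1)//|f| per range, O(1) instead of O(n).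
import Mathlib
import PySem

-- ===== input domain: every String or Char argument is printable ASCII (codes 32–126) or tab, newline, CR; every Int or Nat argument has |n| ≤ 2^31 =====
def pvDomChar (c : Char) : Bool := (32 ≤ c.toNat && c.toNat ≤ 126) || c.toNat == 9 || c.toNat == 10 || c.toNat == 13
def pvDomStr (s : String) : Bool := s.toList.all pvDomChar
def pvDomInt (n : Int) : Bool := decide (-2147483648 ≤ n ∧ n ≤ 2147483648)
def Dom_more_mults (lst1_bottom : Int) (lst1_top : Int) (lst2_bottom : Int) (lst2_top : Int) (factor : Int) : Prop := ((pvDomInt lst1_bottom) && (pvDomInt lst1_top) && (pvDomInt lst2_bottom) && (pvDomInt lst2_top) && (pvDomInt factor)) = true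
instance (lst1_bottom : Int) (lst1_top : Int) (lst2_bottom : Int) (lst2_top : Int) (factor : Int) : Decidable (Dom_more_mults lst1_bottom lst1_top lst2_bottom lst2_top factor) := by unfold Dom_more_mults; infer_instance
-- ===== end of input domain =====

-- B replaces A's range-building and scanning with a closed-form divisor count per range (faster, O(1) vs O(n)).

-- ===== PORT A =====
-- A builds both ranges as lists, counts multiples by scanning, then compares counts and lengths.
def more_mults (lst1_bottom : Int) (lst1_top : Int) (lst2_bottom : Int) (lst2_top : Int) (factor : Int) : String :=
  let lst1 := PySem.List.pyRange lst1_bottom (lst1_top + 1) 1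
  let lst2 := PySem.List.pyRange lst2_bottom (lst2_top + 1) 1
  let c1 : Int := lst1.foldl (fun c v => if PySem.Int.mod v factor == 0 then c + 1 else c) 0
  let c2 : Int := lst2.foldl (fun c v => if PySem.Int.mod v factor == 0 then c + 1 else c) 0
  if c1 > c2 then "List 1"
  else if c1 < c2 then "List 2"
  else if c1 == c2 && lst1.length < lst2.length then "List 1"
  else if c1 == c2 && lst1.length > lst2.length then "List 2"
  else "Tie"

-- ===== PORT B =====
-- closed-form count of multiples of factor in [bottom, top]
def pvCountMults (bottom : Int) (top : Int) (factor : Int) : Int :=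
  if top < bottom then 0
  else
    let af := |factor|
    PySem.Int.floordiv top af - PySem.Int.floordiv (bottom - 1) af

def more_mults_alt (lst1_bottom : Int) (lst1_top : Int) (lst2_bottom : Int) (lst2_top : Int) (factor : Int) : String :=
  let c1 := pvCountMults lst1_bottom lst1_top factor
  let c2 := pvCountMults lst2_bottom lst2_top factor
  if c1 ≠ c2 then (if c1 > c2 then "List 1" else "List 2")
  else
    let len1 := max (lst1_top - lst1_bottom + 1) 0
    let len2 := max (lst2_top - lst2_bottom + 1) 0
    if len1 ≠ len2 then (if len1 < len2 then "List 1" else "List 2")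
    else "Tie"

-- ===== PRECONDITION & SPEC =====
-- Pre_ excludes factor = 0 with a nonempty range, where A raises ZeroDivisionError (B raises there too).
def Pre_more_mults (lst1_bottom : Int) (lst1_top : Int) (lst2_bottom : Int) (lst2_top : Int) (factor : Int) : Prop :=
  factor ≠ 0 ∨ (lst1_top < lst1_bottom ∧ lst2_top < lst2_bottom)
instance (lst1_bottom : Int) (lst1_top : Int) (lst2_bottom : Int) (lst2_top : Int) (factor : Int) : Decidable (Pre_more_mults lst1_bottom lst1_top lst2_bottom lst2_top factor) := by unfold Pre_more_mults; infer_instance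
def pvWitness_more_mults : Int × Int × Int × Int × Int := (1, 10, 3, 8, 3)

def Spec_more_mults (lst1_bottom : Int) (lst1_top : Int) (lst2_bottom : Int) (lst2_top : Int) (factor : Int) (out : String) : Prop := out = more_mults_alt lst1_bottom lst1_top lst2_bottom lst2_top factor
instance (lst1_bottom : Int) (lst1_top : Int) (lst2_bottom : Int) (lst2_top : Int) (factor : Int) (out : String) : Decidable (Spec_more_mults lst1_bottom lst1_top lst2_bottom lst2_top factor out) := by unfold Spec_more_mults; infer_instance

-- ===== CLAIM (what is proved, stated in full; the proofs are below) =====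
def Claim_equal_more_mults : Prop := ∀ (lst1_bottom : Int) (lst1_top : Int) (lst2_bottom : Int) (lst2_top : Int) (factor : Int), Dom_more_mults lst1_bottom lst1_top lst2_bottom lst2_top factor → Pre_more_mults lst1_bottom lst1_top lst2_bottom lst2_top factor → Spec_more_mults lst1_bottom lst1_top lst2_bottom lst2_top factor (more_mults lst1_bottom lst1_top lst2_bottom lst2_top factor)

-- ===== LEMMAS AND PROOFS =====

-- floordiv steps by 1 exactly at multiples
lemma pv_fdiv_pred (a t : Int) (ha : 0 < a) :
    PySem.Int.floordiv t a - PySem.Int.floordiv (t - 1) a = if a ∣ t then 1 else 0 := by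
  have hq := PySem.Int.floordiv_mul_add_mod t a
  have hr0 := PySem.Int.mod_nonneg t ha
  have hr1 := PySem.Int.mod_lt t ha
  have hdvd := PySem.Int.mod_eq_zero_iff_dvd t a
  set q := PySem.Int.floordiv t a with hqdef
  set r := PySem.Int.mod t a with hrdef
  by_cases h : a ∣ t
  · have hr : r = 0 := hdvd.mpr h
    have : PySem.Int.floordiv (t - 1) a = q - 1 := by
      rw [PySem.Int.floordiv_eq_iff_of_pos ha]
      constructor <;> · ring_nf; omega
    rw [this]; simp [h]
  · have hr : 1 ≤ r := by
      have : r ≠ 0 := fun h0 => h (hdvd.mp h0)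
      omega
    have : PySem.Int.floordiv (t - 1) a = q := by
      rw [PySem.Int.floordiv_eq_iff_of_pos ha]
      constructor <;> · ring_nf; omega
    rw [this]; simp [h]

lemma pv_count_step (b t f : Int) (hf : f ≠ 0) (hbt : b ≤ t) :
    pvCountMults b t f = pvCountMults b (t - 1) f + (if |f| ∣ t then 1 else 0) := by
  have ha : 0 < |f| := abs_pos.mpr hf
  by_cases h : t - 1 < b
  · have ht : t = b := by omega
    simp only [pvCountMults, if_neg (by omega : ¬ t < b), if_pos h]
    have := pv_fdiv_pred |f| t ha
    rw [ht] at *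
    omega
  · simp only [pvCountMults, if_neg (by omega : ¬ t < b), if_neg h]
    have := pv_fdiv_pred |f| t ha
    omega

lemma pv_count_eq (f b : Int) (hf : f ≠ 0) :
    ∀ (n : Nat) (t : Int), (t + 1 - b).toNat = n →
    (PySem.List.pyRange b (t + 1) 1).foldl
      (fun c v => if PySem.Int.mod v f = 0 then c + 1 else c) 0 = pvCountMults b t f := by
  intro n
  induction n with
  | zero =>
    intro t ht
    rw [PySem.List.pyRange_one_eq_nil (by omega : t + 1 ≤ b)]
    simp [pvCountMults, if_pos (by omega : t < b)]
  | succ k ih =>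
    intro t ht
    have hbt : b ≤ t := by omega
    rw [PySem.List.pyRange_one_succ_right hbt, List.foldl_append]
    have := ih (t - 1) (by omega)
    rw [show t - 1 + 1 = t from by omega] at this
    rw [this]
    simp only [List.foldl]
    rw [pv_count_step b t f hf hbt]
    have hiff : PySem.Int.mod t f = 0 ↔ |f| ∣ t := by
      rw [PySem.Int.mod_eq_zero_iff_dvd, abs_dvd]
    by_cases h : |f| ∣ t
    · rw [if_pos (hiff.mpr h), if_pos h]
    · rw [if_neg (fun hh => h (hiff.mp hh)), if_neg h]; omega

-- ===== VERDICT (by name: the statement is the Claim_ definition above) =====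
theorem more_mults_spec : Claim_equal_more_mults := by
  intro b1 t1 b2 t2 f _ hpre
  unfold Spec_more_mults more_mults more_mults_alt
  rcases hpre with hf | ⟨h1, h2⟩
  · simp only [gt_iff_lt, beq_iff_eq, Bool.and_eq_true, decide_eq_true_eq, ne_eq,
      PySem.List.length_pyRange_one]
    rw [pv_count_eq f b1 hf (t1 + 1 - b1).toNat t1 rfl,
        pv_count_eq f b2 hf (t2 + 1 - b2).toNat t2 rfl]
    have hl1 : ((t1 + 1 - b1).toNat : Int) = max (t1 - b1 + 1) 0 := by omega
    have hl2 : ((t2 + 1 - b2).toNat : Int) = max (t2 - b2 + 1) 0 := by omega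
    split_ifs <;> first | rfl | omega
  · rw [PySem.List.pyRange_one_eq_nil (by omega : t1 + 1 ≤ b1),
        PySem.List.pyRange_one_eq_nil (by omega : t2 + 1 ≤ b2)]
    simp [pvCountMults, h1, h2]
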